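-- pv_equiv track=rewrite | github.com/Rejean-McCormick/Ame-Artificielle | src/numerology.py | reduce_number
-- ===== SOURCE A (Python) =====
-- from typing import Dict, Iterable, List, Optional, Tuple, Union
--
-- def sum_digits(n: int) -> int:
--     return sum(int(ch) for ch in str(abs(n)))
--
-- def reduce_number(
--     n: int,
--     keep_master_numbers: Iterable[int] = (11, 22, 33),
--     allow_zero: bool = False,
-- ) -> int:
--     """
--     Reduce an integer to a single digit (1..9) by repeated digit-summing.
--     Optionally keep master numbers (11, 22, 33) unreduced.
--
--     If allow_zero=True, 0 reduces to 0; otherwise 0 is invalid.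
--     """
--     if n == 0:
--         if allow_zero:
--             return 0
--         raise ValueError("reduce_number got 0 but allow_zero=False")
--
--     masters = set(keep_master_numbers)
--
--     x = abs(n)
--     while True:
--         if x in masters:
--             return x
--         if x < 10:
--             return x
--         x = sum_digits(x)
-- ===== SOURCE B (Python) =====
-- def reduce_number(n, keep_master_numbers=(11, 22, 33), allow_zero=False):
--     """Reduce n to a single digit by repeated digit-summing, keeping master numbers."""
--     if n == 0:
--         if allow_zero:
--             return 0
--         raise ValueError("reduce_number got 0 but allow_zero=False")
--     masters = set(keep_master_numbers)
--
--     def digit_sum(x):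
--         total = 0
--         while x:
--             x, d = divmod(x, 10)
--             total += d
--         return total
--
--     def go(x):
--         if x < 10 or x in masters:
--             return x
--         return go(digit_sum(x))
--
--     return go(abs(n))
-- ===== Notes on version B (the rewrite author's own statement) =====
-- stated objective: alternative
-- what changed: Tail-recursive reduction over a prebuilt master set with digit sums computed arithmetically by divmod, instead of A's while-True loop summing the characters of str(x); Pre_ excludes n==0 with allow_zero=False, where A (and B) raise ValueError.
import Mathlib
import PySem

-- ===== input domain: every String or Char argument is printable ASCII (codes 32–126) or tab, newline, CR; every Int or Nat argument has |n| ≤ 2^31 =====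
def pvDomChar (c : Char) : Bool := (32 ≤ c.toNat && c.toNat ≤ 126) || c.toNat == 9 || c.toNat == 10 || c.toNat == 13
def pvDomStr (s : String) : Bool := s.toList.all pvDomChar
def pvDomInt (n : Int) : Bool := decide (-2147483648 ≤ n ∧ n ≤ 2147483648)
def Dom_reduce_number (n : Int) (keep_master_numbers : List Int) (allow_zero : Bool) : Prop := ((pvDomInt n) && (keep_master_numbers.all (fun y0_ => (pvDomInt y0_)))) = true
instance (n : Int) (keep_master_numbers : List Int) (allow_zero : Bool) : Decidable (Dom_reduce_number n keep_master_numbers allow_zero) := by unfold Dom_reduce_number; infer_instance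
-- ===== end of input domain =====

-- B is an alternative decomposition: a tail-recursive helper over a prebuilt master set,
-- with digit sums computed by divmod instead of summing the characters of str(x).
-- Both loops carry a fuel argument solely as a structural totality guard (one digit-sum
-- step on x ≥ 10 strictly decreases x, so fuel x+1 is never exhausted — proved below).

-- ===== PORT A =====
-- int(ch) per character of str(abs n); every such character is a decimal digit, so
-- PySem.Int.ofChars? is always `some` and the getD default is never used.
def pyChVal (c : Char) : Int := (PySem.Int.ofChars? [c]).getD 0

-- sum(int(ch) for ch in str(abs(n)))
def pySumDigits (n : Int) : Int := ((PySem.Int.toChars |n|).map pyChVal).sum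

-- the while-True loop of A, state x; fuel is the totality guard (never exhausted)
def loopA (masters : PySem.Set Int) : Nat → Int → Int
  | 0, x => x
  | fuel + 1, x =>
    if masters.contains x then x
    else if x < 10 then x
    else loopA masters fuel (pySumDigits x)

def reduce_number (n : Int) (keep_master_numbers : List Int) (allow_zero : Bool) : Int :=
  if n = 0 then
    (if allow_zero then 0 else 0)  -- raise ValueError: excluded by Pre_
  else
    loopA (PySem.Set.ofList keep_master_numbers) (|n|.toNat + 1) |n|

-- ===== PORT B =====
-- digit_sum: total accumulated over divmod(x, 10); fuel is the totality guard
def altDigitSum : Nat → Nat → Nat → Nat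
  | 0, _, total => total
  | fuel + 1, x, total =>
    if x = 0 then total else altDigitSum fuel (x / 10) (total + x % 10)

-- go: tail recursion over the digit-sum recurrence; fuel is the totality guard
def altGo (masters : PySem.Set Int) : Nat → Nat → Int
  | 0, x => (x : Int)
  | fuel + 1, x =>
    if x < 10 || masters.contains (x : Int) then (x : Int)
    else altGo masters fuel (altDigitSum (x + 1) x 0)

def reduce_number_alt (n : Int) (keep_master_numbers : List Int) (allow_zero : Bool) : Int :=
  if n = 0 then
    (if allow_zero then 0 else 0)  -- raise ValueError: excluded by Pre_
  else
    altGo (PySem.Set.ofList keep_master_numbers) (n.natAbs + 1) n.natAbs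

-- ===== PRECONDITION & SPEC =====
-- Pre_ excludes exactly n = 0 with allow_zero = false, where the Python A raises ValueError.
def Pre_reduce_number (n : Int) (keep_master_numbers : List Int) (allow_zero : Bool) : Prop :=
  n ≠ 0 ∨ allow_zero = true
instance (n : Int) (keep_master_numbers : List Int) (allow_zero : Bool) : Decidable (Pre_reduce_number n keep_master_numbers allow_zero) := by unfold Pre_reduce_number; infer_instance

def pvWitness_reduce_number : Int × List Int × Bool := (29, [11, 22, 33], false)

def Spec_reduce_number (n : Int) (keep_master_numbers : List Int) (allow_zero : Bool) (out : Int) : Prop := out = reduce_number_alt n keep_master_numbers allow_zero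
instance (n : Int) (keep_master_numbers : List Int) (allow_zero : Bool) (out : Int) : Decidable (Spec_reduce_number n keep_master_numbers allow_zero out) := by unfold Spec_reduce_number; infer_instance

-- ===== CLAIM =====
def Claim_equal_reduce_number : Prop := ∀ (n : Int) (keep_master_numbers : List Int) (allow_zero : Bool), Dom_reduce_number n keep_master_numbers allow_zero → Pre_reduce_number n keep_master_numbers allow_zero → Spec_reduce_number n keep_master_numbers allow_zero (reduce_number n keep_master_numbers allow_zero)

-- ===== LEMMAS AND PROOFS =====
theorem pyChVal_digitChar (d : Nat) (h : d < 10) :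
    pyChVal (Nat.digitChar d) = (d : Int) := by
  interval_cases d <;> decide

theorem sum_toDigitsCore (fuel : Nat) : ∀ (n : Nat) (acc : List Char), n < fuel →
    ((Nat.toDigitsCore 10 fuel n acc).map pyChVal).sum
      = ((Nat.digits 10 n).sum : Int) + (acc.map pyChVal).sum := by
  induction fuel with
  | zero => intro n acc h; omega
  | succ fuel ih =>
    intro n acc h
    rw [Nat.toDigitsCore]
    by_cases h0 : n / 10 = 0
    · rw [if_pos h0]
      have hn : n < 10 := by omega
      rcases Nat.eq_zero_or_pos n with hz | hp
      · subst hz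
        rw [List.map_cons, List.sum_cons, pyChVal_digitChar 0 (by norm_num)]
        simp
      · rw [List.map_cons, List.sum_cons, pyChVal_digitChar (n % 10) (Nat.mod_lt _ (by norm_num)),
          Nat.digits_def' (by norm_num : 1 < 10) hp, h0]
        simp only [Nat.digits_zero, List.sum_cons, List.sum_nil]
        push_cast
        ring
    · rw [if_neg h0]
      have hge : 10 ≤ n := by omega
      rw [ih (n / 10) _ (by omega), List.map_cons, List.sum_cons,
        pyChVal_digitChar (n % 10) (Nat.mod_lt _ (by norm_num)),
        Nat.digits_def' (by norm_num : 1 < 10) (by omega : 0 < n), List.sum_cons]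
      push_cast
      ring

theorem pySumDigits_eq (n : Int) :
    pySumDigits n = ((Nat.digits 10 n.natAbs).sum : Int) := by
  unfold pySumDigits PySem.Int.toChars
  rw [Int.abs_eq_natAbs, if_neg (by omega : ¬ ((n.natAbs : Int) < 0))]
  rw [Int.toNat_natCast]
  unfold Nat.toDigits
  rw [sum_toDigitsCore (n.natAbs + 1) n.natAbs [] (by omega)]
  simp

theorem digits_sum_lt (m : Nat) (h : 10 ≤ m) : (Nat.digits 10 m).sum < m := by
  rw [Nat.digits_def' (by norm_num : 1 < 10) (by omega : 0 < m)]
  have h1 := Nat.digit_sum_le 10 (m / 10)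
  have h2 := Nat.div_add_mod m 10
  simp only [List.sum_cons]
  omega

theorem altDigitSum_eq (fuel : Nat) : ∀ (x total : Nat), x < fuel →
    altDigitSum fuel x total = (Nat.digits 10 x).sum + total := by
  induction fuel with
  | zero => intro x total h; omega
  | succ fuel ih =>
    intro x total h
    rw [altDigitSum]
    by_cases hx : x = 0
    · simp [hx]
    · rw [if_neg hx, ih (x / 10) (total + x % 10) (by omega),
        Nat.digits_def' (by norm_num : 1 < 10) (Nat.pos_of_ne_zero hx), List.sum_cons]
      omega

theorem loopA_eq_altGo (masters : PySem.Set Int) (x : Nat) :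
    ∀ (fa fb : Nat), x < fa → x < fb →
      loopA masters fa (x : Int) = altGo masters fb x := by
  induction x using Nat.strong_induction_on with
  | _ x ih =>
    intro fa fb hfa hfb
    match fa, fb with
    | fa + 1, fb + 1 =>
      rw [loopA, altGo]
      by_cases hm : ((x : Int) ∈ masters)
      · simp [hm]
      · by_cases hlt : x < 10
        · have hlt' : ((x : Int) < 10) := by exact_mod_cast hlt
          simp [hm, hlt, hlt']
        · have hge : 10 ≤ x := le_of_not_gt hlt
          have hlt' : ¬ ((x : Int) < 10) := by exact_mod_cast hlt
          rw [if_neg (by simpa using hm), if_neg hlt', if_neg (by simp [hm, hlt])]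
          have hsum : pySumDigits (x : Int) = ((altDigitSum (x + 1) x 0 : Nat) : Int) := by
            rw [pySumDigits_eq, altDigitSum_eq (x + 1) x 0 (by omega)]
            simp
          have hlt2 := digits_sum_lt x hge
          have hdig : altDigitSum (x + 1) x 0 = (Nat.digits 10 x).sum := by
            rw [altDigitSum_eq (x + 1) x 0 (by omega)]; omega
          rw [hsum]
          exact ih (altDigitSum (x + 1) x 0) (by omega) fa fb (by omega) (by omega)

-- ===== VERDICT =====
theorem reduce_number_spec : Claim_equal_reduce_number := by
  intro n kms az _ _
  unfold Spec_reduce_number reduce_number reduce_number_alt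
  by_cases h0 : n = 0
  · simp [h0]
  · rw [if_neg h0, if_neg h0, Int.abs_eq_natAbs, Int.toNat_natCast]
    exact loopA_eq_altGo _ n.natAbs (n.natAbs + 1) (n.natAbs + 1) (by omega) (by omega)
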